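-- pv_equiv track=rewrite | github.com/AllenKd/algorithm_practice | online_assessment/temp1.py | minimumHours
-- ===== SOURCE A (Python) =====
-- def minimumHours(rows, columns, grid):
--     # WRITE YOUR CODE HERE
--     if not rows or not columns:
--         return 0
--
--     q = [[i, j] for i in range(rows) for j in range(columns) if grid[i][j] == 1]
--     if len(q) == rows * columns:
--         return 0
--
--     directions = [[1, 0], [-1, 0], [0, 1], [0, -1]]
--     hour = 0
--
--     while True:
--         new = []
--
--         for i, j in q:
--             for d in directions:
--                 ni, nj = i + d[0], j + d[1]
--                 if 0 <= ni < rows and 0 <= nj < columns and grid[ni][nj] == 0: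
--                     grid[ni][nj] = 1
--                     new.append([ni, nj])
--
--         q = new
--         if not q:
--             break
--         hour += 1
--
--     return hour
-- ===== SOURCE B (Python) =====
-- def minimumHours(rows, columns, grid):
--     # Synchronous cellular-automaton dilation to a fixed point instead of BFS:
--     # each hour rebuilds the whole board, turning every 0 with a 1-neighbour
--     # into 1, until nothing changes.  Return value only: does not mutate grid.
--     if rows <= 0 or columns <= 0:
--         return 0
--
--     def dilate(g):
--         return [[1 if g[i][j] == 0 and (
--                     (i + 1 < rows and g[i + 1][j] == 1) or
--                     (i > 0 and g[i - 1][j] == 1) or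
--                     (j + 1 < columns and g[i][j + 1] == 1) or
--                     (j > 0 and g[i][j - 1] == 1))
--                  else g[i][j]
--                  for j in range(columns)] for i in range(rows)]
--
--     cur = [[grid[i][j] for j in range(columns)] for i in range(rows)]
--     hours = 0
--     while True:
--         nxt = dilate(cur)
--         if nxt == cur:
--             return hours
--         cur = nxt
--         hours += 1
-- ===== Notes on version B (the rewrite author's own statement) =====
-- stated objective: alternative
-- what changed: Replaces A's queue-based frontier BFS with a synchronous cellular-automaton fixed-point iteration: each hour the whole cropped board is rebuilt (every 0 with a 1-neighbour becomes 1) until the board stops changing; no queue or frontier list exists, and B does not mutate the caller's grid.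
import Mathlib
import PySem

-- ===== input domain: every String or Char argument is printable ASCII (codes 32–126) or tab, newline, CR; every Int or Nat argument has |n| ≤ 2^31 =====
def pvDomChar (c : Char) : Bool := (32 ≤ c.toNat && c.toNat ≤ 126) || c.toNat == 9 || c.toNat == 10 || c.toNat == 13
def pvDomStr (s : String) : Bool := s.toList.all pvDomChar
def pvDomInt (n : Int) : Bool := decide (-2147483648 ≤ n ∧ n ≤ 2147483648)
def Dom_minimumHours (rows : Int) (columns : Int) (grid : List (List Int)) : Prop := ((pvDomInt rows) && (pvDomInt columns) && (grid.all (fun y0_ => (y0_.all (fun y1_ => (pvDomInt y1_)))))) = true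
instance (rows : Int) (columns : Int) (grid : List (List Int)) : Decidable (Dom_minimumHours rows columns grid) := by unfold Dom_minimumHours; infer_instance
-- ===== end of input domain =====

-- B replaces A's queue-based BFS by a synchronous dilation iterated to a fixed point;
-- equivalence is about the RETURN value only: A mutates the caller's grid, B does not.

-- shared grid primitive
-- grid[i][j] under a bounds guard; the default 1 is only reachable outside Pre_minimumHours,
-- where the Python raises IndexError.
def pvGet (g : List (List Int)) (i j : Int) : Int :=
  (((PySem.List.pyGet? g i).bind fun row => PySem.List.pyGet? row j).getD 1)

-- grid[i][j] = 1 (only evaluated with 0 ≤ i, 0 ≤ j under the same guard)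
def pvSet1 (g : List (List Int)) (i j : Int) : List (List Int) :=
  g.set i.toNat ((g.getD i.toNat []).set j.toNat 1)

-- number of 0-cells: the termination measure of both while-loops
def pvZeros (g : List (List Int)) : Nat :=
  (g.map (fun row => row.countP (fun x => x == 0))).sum

def pvDirs : List (Int × Int) := [(1, 0), (-1, 0), (0, 1), (0, -1)]

-- ===== PORT A =====
-- body of A's inner 'for d in directions' loop (ni, nj inlined as i + d[0], j + d[1])
def pvDirStepA (rows columns i j : Int) (st : List (List Int) × List (Int × Int))
    (d : Int × Int) : List (List Int) × List (Int × Int) :=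
  if 0 ≤ i + d.1 ∧ i + d.1 < rows ∧ 0 ≤ j + d.2 ∧ j + d.2 < columns ∧
      pvGet st.1 (i + d.1) (j + d.2) = 0 then
    (pvSet1 st.1 (i + d.1) (j + d.2), st.2 ++ [(i + d.1, j + d.2)])
  else st

-- one frontier cell: expand in the four directions
def pvStepCellA (rows columns : Int) (st : List (List Int) × List (Int × Int))
    (c : Int × Int) : List (List Int) × List (Int × Int) :=
  pvDirs.foldl (pvDirStepA rows columns c.1 c.2) st

-- one whole level: 'new = []; for i, j in q: …'
def pvLevelA (rows columns : Int) (g : List (List Int)) (q : List (Int × Int)) :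
    List (List Int) × List (Int × Int) :=
  q.foldl (pvStepCellA rows columns) (g, [])

-- 'while True: …' of A; the fuel only makes the recursion structural: pvZeros g + 1
-- iterations always suffice (each nonempty 'new' flipped that many 0s to 1)
def pvLoopA (rows columns : Int) (fuel : Nat) (g : List (List Int)) (q : List (Int × Int))
    (hour : Int) : Int :=
  match fuel with
  | 0 => hour
  | fuel + 1 =>
    let st := pvLevelA rows columns g q
    if st.2.isEmpty then hour
    else pvLoopA rows columns fuel st.1 st.2 (hour + 1)

-- q = [[i, j] for i in range(rows) for j in range(columns) if grid[i][j] == 1]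
def pvSeedsA (rows columns : Int) (g : List (List Int)) : List (Int × Int) :=
  (PySem.List.pyRange 0 rows 1).foldl (fun acc i =>
    (PySem.List.pyRange 0 columns 1).foldl (fun acc j =>
      if pvGet g i j = 1 then acc ++ [(i, j)] else acc) acc) []

def minimumHours (rows : Int) (columns : Int) (grid : List (List Int)) : Int :=
  if rows = 0 ∨ columns = 0 then 0
  else
    let q := pvSeedsA rows columns grid
    if (q.length : Int) = rows * columns then 0
    else pvLoopA rows columns (pvZeros grid + 1) grid q 0

-- ===== PORT B =====
-- the bracketed neighbour test of B's dilate comprehension (same or-chain, same order)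
def pvNbrB (rows columns : Int) (g : List (List Int)) (i j : Int) : Bool :=
  decide (i + 1 < rows ∧ pvGet g (i + 1) j = 1) ||
  decide (0 < i ∧ pvGet g (i - 1) j = 1) ||
  decide (j + 1 < columns ∧ pvGet g i (j + 1) = 1) ||
  decide (0 < j ∧ pvGet g i (j - 1) = 1)

-- B's dilate(g): rebuild the whole board, every 0 with a 1-neighbour becomes 1
def pvDilate (rows columns : Int) (g : List (List Int)) : List (List Int) :=
  (PySem.List.pyRange 0 rows 1).map (fun i =>
    (PySem.List.pyRange 0 columns 1).map (fun j =>
      if pvGet g i j = 0 ∧ pvNbrB rows columns g i j = true then 1 else pvGet g i j))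

-- cur = [[grid[i][j] for j in range(columns)] for i in range(rows)]
def pvCrop (rows columns : Int) (g : List (List Int)) : List (List Int) :=
  (PySem.List.pyRange 0 rows 1).map (fun i =>
    (PySem.List.pyRange 0 columns 1).map (fun j => pvGet g i j))

-- B's 'while True' loop; the fuel only makes the recursion structural: pvZeros cur + 1
-- iterations always reach the fixed point (each changing dilation kills a 0)
def pvLoopDil (rows columns : Int) (fuel : Nat) (cur : List (List Int)) (hours : Int) : Int :=
  match fuel with
  | 0 => hours
  | fuel + 1 =>
    let nxt := pvDilate rows columns cur
    if nxt = cur then hours else pvLoopDil rows columns fuel nxt (hours + 1)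

def minimumHours_alt (rows : Int) (columns : Int) (grid : List (List Int)) : Int :=
  if rows ≤ 0 ∨ columns ≤ 0 then 0
  else
    let cur := pvCrop rows columns grid
    pvLoopDil rows columns (pvZeros cur + 1) cur 0

-- ===== PRECONDITION & SPEC =====
-- Pre_ excludes exactly the inputs on which the Python A raises IndexError: a positive
-- rows/columns pair whose scanned rows are missing or shorter than columns.
def Pre_minimumHours (rows : Int) (columns : Int) (grid : List (List Int)) : Prop :=
  0 < rows → 0 < columns →
    (rows ≤ (grid.length : Int) ∧ ∀ row ∈ grid.take rows.toNat, columns ≤ (row.length : Int))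
instance (rows : Int) (columns : Int) (grid : List (List Int)) : Decidable (Pre_minimumHours rows columns grid) := by unfold Pre_minimumHours; infer_instance

def pvWitness_minimumHours : Int × Int × List (List Int) := (2, 3, [[1, 0, 0], [0, 0, 2]])

def Spec_minimumHours (rows : Int) (columns : Int) (grid : List (List Int)) (out : Int) : Prop := out = minimumHours_alt rows columns grid
instance (rows : Int) (columns : Int) (grid : List (List Int)) (out : Int) : Decidable (Spec_minimumHours rows columns grid out) := by unfold Spec_minimumHours; infer_instance

-- ===== CLAIM (what is proved, stated in full; the proofs are below) =====
def Claim_equal_minimumHours : Prop := ∀ (rows : Int) (columns : Int) (grid : List (List Int)), Dom_minimumHours rows columns grid → Pre_minimumHours rows columns grid → Spec_minimumHours rows columns grid (minimumHours rows columns grid)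

-- ===== LEMMAS AND PROOFS =====

theorem pvSeedsA_flat (rows columns : Int) (g : List (List Int)) :
    pvSeedsA rows columns g
      = (PySem.List.pyRange 0 rows 1).flatMap (fun i =>
          ((PySem.List.pyRange 0 columns 1).filter (fun j => decide (pvGet g i j = 1))).map
            (fun j => (i, j))) := by
  unfold pvSeedsA
  simp only [PySem.List.foldl_append_ite]
  rw [PySem.List.foldl_append_eq_flatMap]
  simp

theorem pvSeedsA_nil (rows columns : Int) (g : List (List Int)) (h : rows ≤ 0 ∨ columns ≤ 0) :
    pvSeedsA rows columns g = [] := by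
  rw [pvSeedsA_flat]
  rcases h with h | h
  · rw [PySem.List.pyRange_one_eq_nil (b := rows) h]
    simp
  · rw [PySem.List.pyRange_one_eq_nil (b := columns) h]
    simp

theorem pvLoopA_eq (rows columns : Int) (fuel : Nat) (g : List (List Int))
    (q : List (Int × Int)) (hour : Int) :
    pvLoopA rows columns (fuel + 1) g q hour
      = if (pvLevelA rows columns g q).2.isEmpty then hour
        else pvLoopA rows columns fuel (pvLevelA rows columns g q).1
          (pvLevelA rows columns g q).2 (hour + 1) := rfl

theorem pvLoopA_nil (rows columns : Int) (fuel : Nat) (g : List (List Int)) (hour : Int) :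
    pvLoopA rows columns (fuel + 1) g [] hour = hour := rfl

theorem pvSum_all_eq : ∀ (l : List Nat) (k : Nat),
    (∀ x ∈ l, x ≤ k) → l.sum = l.length * k → ∀ x ∈ l, x = k := by
  intro l k
  induction l with
  | nil => simp
  | cons a l ih =>
    intro hb hs x hx
    have ha : a ≤ k := hb a (by simp)
    have hl : l.sum ≤ l.length * k := by
      simpa [smul_eq_mul] using List.sum_le_card_nsmul l k (fun y hy => hb y (by simp [hy]))
    simp only [List.sum_cons, List.length_cons] at hs
    have hexp : (l.length + 1) * k = l.length * k + k := by ring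
    rcases List.mem_cons.mp hx with h | h
    · omega
    · exact ih (fun y hy => hb y (by simp [hy])) (by omega) x h

theorem pvAllOnes (rows columns : Int) (g : List (List Int)) (hr : rows ≠ 0) (hc : columns ≠ 0)
    (hl : ((pvSeedsA rows columns g).length : Int) = rows * columns) :
    ∀ i j : Int, 0 ≤ i → i < rows → 0 ≤ j → j < columns → pvGet g i j = 1 := by
  rw [pvSeedsA_flat, List.length_flatMap] at hl
  simp only [List.length_map] at hl
  have hmul : rows * columns ≠ 0 := mul_ne_zero hr hc
  by_cases hrpos : 0 < rows
  swap
  · exfalso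
    rw [PySem.List.pyRange_one_eq_nil (b := rows) (by omega)] at hl
    simp at hl
    rcases hl with h | h
    · exact hr h
    · exact hc h
  by_cases hcpos : 0 < columns
  swap
  · exfalso
    rw [PySem.List.pyRange_one_eq_nil (b := columns) (by omega)] at hl
    simp at hl
    rcases hl with h | h
    · exact hr h
    · exact hc h
  set L := (PySem.List.pyRange 0 rows 1).map
    (fun i => ((PySem.List.pyRange 0 columns 1).filter (fun j => decide (pvGet g i j = 1))).length)
    with hL
  have hlen : L.length = rows.toNat := by
    simp [hL, PySem.List.length_pyRange_one]
  have hb : ∀ x ∈ L, x ≤ columns.toNat := by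
    intro x hx
    obtain ⟨i, _, hxi⟩ := List.mem_map.mp hx
    calc x = _ := hxi.symm
      _ ≤ (PySem.List.pyRange 0 columns 1).length := List.length_filter_le _ _
      _ = columns.toNat := by simp [PySem.List.length_pyRange_one]
  have hrn : rows = (rows.toNat : Int) := (Int.toNat_of_nonneg hrpos.le).symm
  have hcn : columns = (columns.toNat : Int) := (Int.toNat_of_nonneg hcpos.le).symm
  have hsum : L.sum = L.length * columns.toNat := by
    rw [hlen]
    rw [hrn, hcn] at hl
    exact_mod_cast hl
  have hall := pvSum_all_eq L columns.toNat hb hsum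
  intro i j hi0 hir hj0 hjc
  have hiL : ((PySem.List.pyRange 0 columns 1).filter
      (fun j => decide (pvGet g i j = 1))).length = columns.toNat :=
    hall _ (List.mem_map_of_mem (PySem.List.mem_pyRange_one.mpr ⟨hi0, hir⟩))
  have hfilt : ∀ a ∈ PySem.List.pyRange 0 columns 1, decide (pvGet g i a = 1) = true :=
    List.length_filter_eq_length_iff.mp
      (by rw [hiL, PySem.List.length_pyRange_one]; simp)
  have := hfilt j (PySem.List.mem_pyRange_one.mpr ⟨hj0, hjc⟩)
  simpa using this


def pvInw (rows columns i j : Int) : Prop := 0 ≤ i ∧ i < rows ∧ 0 ≤ j ∧ j < columns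

-- the set of cells A's level flips: in-window 0-cells adjacent to a frontier cell
def pvFlip (rows columns : Int) (q : List (Int × Int)) (g : List (List Int)) (i j : Int) : Prop :=
  pvInw rows columns i j ∧ pvGet g i j = 0 ∧
    ∃ c ∈ q, ∃ d ∈ pvDirs, i = c.1 + d.1 ∧ j = c.2 + d.2

-- same, for a single frontier cell and a suffix of the direction list
def pvFlipD (rows columns ci cj : Int) (ds : List (Int × Int)) (g : List (List Int))
    (i j : Int) : Prop :=
  pvInw rows columns i j ∧ pvGet g i j = 0 ∧ ∃ d ∈ ds, i = ci + d.1 ∧ j = cj + d.2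

-- pointwise description of a transformed grid: flips P to 1, keeps the rest
def pvPt (g' g : List (List Int)) (P : Int → Int → Prop) : Prop :=
  ∀ i j : Int, 0 ≤ i → 0 ≤ j →
    (P i j → pvGet g' i j = 1) ∧ (¬ P i j → pvGet g' i j = pvGet g i j)

def pvWS (rows columns : Int) (g : List (List Int)) : Prop :=
  g.length = rows.toNat ∧ ∀ r ∈ g, r.length = columns.toNat

def pvAgree (rows columns : Int) (g cur : List (List Int)) : Prop :=
  ∀ i j : Int, pvInw rows columns i j → pvGet g i j = pvGet cur i j

def pvInvA (rows columns : Int) (q : List (Int × Int)) (g : List (List Int)) : Prop :=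
  ∀ c ∈ q, pvInw rows columns c.1 c.2 ∧ pvGet g c.1 c.2 = 1

def pvInvB (rows columns : Int) (q : List (Int × Int)) (g : List (List Int)) : Prop :=
  ∀ i j : Int, pvInw rows columns i j → pvGet g i j = 1 →
    (∃ d ∈ pvDirs, pvInw rows columns (i + d.1) (j + d.2) ∧ pvGet g (i + d.1) (j + d.2) = 0) →
    (i, j) ∈ q

-- counting lemmas: a flipped cell removes one zero; a level removes as many zeros as it appends
theorem pvCountP_set_zero (l : List Int) (m : Nat) (hm : m < l.length) (h0 : l[m] = 0) :
    (l.set m 1).countP (fun x => x == 0) + 1 = l.countP (fun x => x == 0) := by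
  induction l generalizing m with
  | nil => simp at hm
  | cons a l ih =>
    cases m with
    | zero => simp_all
    | succ m =>
      simp only [List.set_cons_succ, List.countP_cons]
      have := ih m (by simpa using hm) (by simpa using h0)
      omega

theorem pvZeros_cons (a : List Int) (g : List (List Int)) :
    pvZeros (a :: g) = a.countP (fun x => x == 0) + pvZeros g := by
  simp [pvZeros]

theorem pvZeros_set (g : List (List Int)) (n : Nat) (r : List Int) (hn : n < g.length) :
    pvZeros (g.set n r) + g[n].countP (fun x => x == 0)
      = pvZeros g + r.countP (fun x => x == 0) := by
  induction g generalizing n with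
  | nil => simp at hn
  | cons a g ih =>
    cases n with
    | zero => simp [pvZeros_cons]; omega
    | succ n =>
      simp only [List.set_cons_succ, pvZeros_cons, List.getElem_cons_succ]
      have := ih n (by simpa using hn)
      omega

theorem pvZeros_set1 (g : List (List Int)) (i j : Int)
    (h : pvGet g i j = 0) (hi : 0 ≤ i) (hj : 0 ≤ j) :
    pvZeros (pvSet1 g i j) + 1 = pvZeros g := by
  unfold pvGet at h
  rw [PySem.List.pyGet?_of_nonneg g hi] at h
  cases hrow : g[i.toNat]? with
  | none => simp [hrow] at h
  | some row =>
    rw [hrow] at h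
    simp only [Option.bind_some] at h
    rw [PySem.List.pyGet?_of_nonneg row hj] at h
    cases hcell : row[j.toNat]? with
    | none => simp [hcell] at h
    | some v =>
      rw [hcell] at h
      simp only [Option.getD_some] at h
      subst h
      have hiN : i.toNat < g.length := (List.getElem?_eq_some_iff.mp hrow).1
      have hrow' : g[i.toNat] = row := by
        have := (List.getElem?_eq_some_iff.mp hrow).2; exact this
      have hjN : j.toNat < row.length := (List.getElem?_eq_some_iff.mp hcell).1
      have hcell' : row[j.toNat] = 0 := (List.getElem?_eq_some_iff.mp hcell).2
      unfold pvSet1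
      have hgetD : g.getD i.toNat [] = row := by
        rw [List.getD_eq_getElem _ _ hiN, hrow']
      rw [hgetD]
      have h1 := pvZeros_set g i.toNat (row.set j.toNat 1) hiN
      have h2 := pvCountP_set_zero row j.toNat hjN hcell'
      rw [hrow'] at h1
      omega

theorem pvZeros_dirsA (rows columns i j : Int) :
    ∀ (ds : List (Int × Int)) (st : List (List Int) × List (Int × Int)),
      pvZeros (List.foldl (pvDirStepA rows columns i j) st ds).1 +
        (List.foldl (pvDirStepA rows columns i j) st ds).2.length
      = pvZeros st.1 + st.2.length := by
  intro ds
  induction ds with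
  | nil => intro st; rfl
  | cons d ds ih =>
    intro st
    simp only [List.foldl_cons]
    rw [ih]
    unfold pvDirStepA
    split_ifs with hc
    · have := pvZeros_set1 st.1 _ _ hc.2.2.2.2 hc.1 hc.2.2.1
      simp only [List.length_append, List.length_cons, List.length_nil]
      omega
    · rfl

theorem pvZeros_levelA (rows columns : Int) :
    ∀ (q : List (Int × Int)) (st : List (List Int) × List (Int × Int)),
      pvZeros (List.foldl (pvStepCellA rows columns) st q).1 +
        (List.foldl (pvStepCellA rows columns) st q).2.length
      = pvZeros st.1 + st.2.length := by
  intro q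
  induction q with
  | nil => intro st; rfl
  | cons c q ih =>
    intro st
    simp only [List.foldl_cons]
    rw [ih]
    exact pvZeros_dirsA rows columns c.1 c.2 pvDirs st


theorem pvPyGet?_set {α : Type} (l : List α) (m : Nat) (r : α) (k : Int) (hk : 0 ≤ k) :
    PySem.List.pyGet? (l.set m r) k
      = if k.toNat = m ∧ m < l.length then some r else PySem.List.pyGet? l k := by
  rw [PySem.List.pyGet?_of_nonneg _ hk, PySem.List.pyGet?_of_nonneg _ hk]
  by_cases hm : m = k.toNat
  · subst hm
    by_cases hlen : k.toNat < l.length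
    · rw [if_pos ⟨rfl, hlen⟩, List.getElem?_set, if_pos rfl, if_pos hlen]
    · rw [if_neg (fun hh => hlen hh.2), List.getElem?_set, if_pos rfl, if_neg hlen,
        List.getElem?_eq_none (le_of_not_gt hlen)]
  · rw [if_neg (fun hh => hm hh.1.symm), List.getElem?_set, if_neg hm]

theorem pvGet_set1 (g : List (List Int)) (i j i' j' : Int)
    (h0 : pvGet g i j = 0) (hi : 0 ≤ i) (hj : 0 ≤ j) (hi' : 0 ≤ i') (hj' : 0 ≤ j') :
    pvGet (pvSet1 g i j) i' j' = if i' = i ∧ j' = j then 1 else pvGet g i' j' := by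
  have hx := h0
  unfold pvGet at hx
  rw [PySem.List.pyGet?_of_nonneg g hi] at hx
  cases hrow : g[i.toNat]? with
  | none => simp [hrow] at hx
  | some row =>
    rw [hrow] at hx
    simp only [Option.bind_some] at hx
    rw [PySem.List.pyGet?_of_nonneg row hj] at hx
    cases hcell : row[j.toNat]? with
    | none => simp [hcell] at hx
    | some v =>
      rw [hcell] at hx
      simp only [Option.getD_some] at hx
      subst hx
      have hiN : i.toNat < g.length := (List.getElem?_eq_some_iff.mp hrow).1
      have hrow' : g[i.toNat] = row := (List.getElem?_eq_some_iff.mp hrow).2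
      have hjN : j.toNat < row.length := (List.getElem?_eq_some_iff.mp hcell).1
      have hgd : g.getD i.toNat [] = row := by rw [List.getD_eq_getElem _ _ hiN, hrow']
      unfold pvSet1 pvGet
      rw [hgd]
      rw [pvPyGet?_set g i.toNat (row.set j.toNat 1) i' hi']
      by_cases hii : i'.toNat = i.toNat
      · rw [if_pos ⟨hii, hiN⟩]
        simp only [Option.bind_some]
        rw [pvPyGet?_set row j.toNat 1 j' hj']
        by_cases hjj : j'.toNat = j.toNat
        · rw [if_pos ⟨hjj, hjN⟩, if_pos ⟨by omega, by omega⟩]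
          simp
        · rw [if_neg (fun hh => hjj hh.1), if_neg (fun hh => hjj (by rw [hh.2]))]
          rw [PySem.List.pyGet?_of_nonneg g hi', show i'.toNat = i.toNat from hii, hrow]
          simp
      · rw [if_neg (fun hh => hii hh.1), if_neg (fun hh => hii (by rw [hh.1]))]

theorem pvMapGet? {α : Type} (f : Int → α) (n i : Int) (h0 : 0 ≤ i) (hn : i < n) :
    PySem.List.pyGet? ((PySem.List.pyRange 0 n 1).map f) i = some (f i) := by
  rw [PySem.List.pyGet?_of_nonneg _ h0, PySem.List.pyRange_one, List.map_map,
    List.getElem?_map, List.getElem?_range (show i.toNat < (n - 0).toNat by omega)]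
  simp [Int.toNat_of_nonneg h0]

theorem pvGet_mapmap (f : Int → Int → Int) (n m i j : Int) (hi0 : 0 ≤ i) (hin : i < n)
    (hj0 : 0 ≤ j) (hjm : j < m) :
    pvGet ((PySem.List.pyRange 0 n 1).map (fun i =>
      (PySem.List.pyRange 0 m 1).map (fun j => f i j))) i j = f i j := by
  unfold pvGet
  rw [pvMapGet? _ n i hi0 hin]
  simp only [Option.bind_some]
  rw [pvMapGet? _ m j hj0 hjm]
  simp

theorem pvGet_elem (g : List (List Int)) (k l : Nat) (hk : k < g.length)
    (hl : l < g[k].length) :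
    pvGet g (k : Int) (l : Int) = g[k][l] := by
  unfold pvGet
  rw [PySem.List.pyGet?_of_nonneg g (Int.natCast_nonneg k)]
  simp only [Int.toNat_natCast]
  rw [List.getElem?_eq_getElem hk]
  simp only [Option.bind_some]
  rw [PySem.List.pyGet?_of_nonneg _ (Int.natCast_nonneg l)]
  simp only [Int.toNat_natCast]
  rw [List.getElem?_eq_getElem hl]
  simp

theorem pvWS_dilate (rows columns : Int) (g : List (List Int)) :
    pvWS rows columns (pvDilate rows columns g) := by
  constructor
  · simp [pvDilate, PySem.List.length_pyRange_one]
  · intro r hr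
    simp only [pvDilate, List.mem_map] at hr
    obtain ⟨i, _, rfl⟩ := hr
    simp [PySem.List.length_pyRange_one]

theorem pvWS_crop (rows columns : Int) (g : List (List Int)) :
    pvWS rows columns (pvCrop rows columns g) := by
  constructor
  · simp [pvCrop, PySem.List.length_pyRange_one]
  · intro r hr
    simp only [pvCrop, List.mem_map] at hr
    obtain ⟨i, _, rfl⟩ := hr
    simp [PySem.List.length_pyRange_one]

theorem pvGet_crop (rows columns : Int) (g : List (List Int)) (i j : Int)
    (h : pvInw rows columns i j) : pvGet (pvCrop rows columns g) i j = pvGet g i j := by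
  obtain ⟨hi0, hir, hj0, hjc⟩ := h
  unfold pvCrop
  exact pvGet_mapmap (fun a b => pvGet g a b) rows columns i j hi0 hir hj0 hjc

theorem pvGet_dilate (rows columns : Int) (g : List (List Int)) (i j : Int)
    (h : pvInw rows columns i j) :
    pvGet (pvDilate rows columns g) i j
      = if pvGet g i j = 0 ∧ pvNbrB rows columns g i j = true then 1 else pvGet g i j := by
  obtain ⟨hi0, hir, hj0, hjc⟩ := h
  unfold pvDilate
  exact pvGet_mapmap
    (fun a b => if pvGet g a b = 0 ∧ pvNbrB rows columns g a b = true then 1 else pvGet g a b)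
    rows columns i j hi0 hir hj0 hjc

theorem pvMatEq (rows columns : Int) (a b : List (List Int))
    (ha : pvWS rows columns a) (hb : pvWS rows columns b)
    (h : ∀ i j : Int, pvInw rows columns i j → pvGet a i j = pvGet b i j) : a = b := by
  apply List.ext_getElem (ha.1.trans hb.1.symm)
  intro k h1 h2
  apply List.ext_getElem
    ((ha.2 _ (List.getElem_mem _)).trans (hb.2 _ (List.getElem_mem _)).symm)
  intro l hl1 hl2
  have hkr : (k : Int) < rows := by
    have := ha.1 ▸ h1
    omega
  have hlc : (l : Int) < columns := by
    have hc := ha.2 _ (List.getElem_mem h1)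
    rw [hc] at hl1
    omega
  have hin : pvInw rows columns k l := ⟨Int.natCast_nonneg k, hkr, Int.natCast_nonneg l, hlc⟩
  have hh := h k l hin
  rw [pvGet_elem a k l h1 hl1, pvGet_elem b k l h2 hl2] at hh
  exact hh

theorem pvRowLe : ∀ (a b : List Int), b.length = a.length →
    (∀ l (hb : l < b.length) (ha : l < a.length), b[l] = a[l] ∨ (a[l] = 0 ∧ b[l] = 1)) →
    b.countP (fun x => x == 0) ≤ a.countP (fun x => x == 0) ∧
      (b.countP (fun x => x == 0) = a.countP (fun x => x == 0) → b = a) := by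
  intro a
  induction a with
  | nil =>
    intro b hlen _
    have hb : b = [] := List.eq_nil_of_length_eq_zero (by simpa using hlen)
    subst hb
    exact ⟨le_rfl, fun _ => rfl⟩
  | cons x a ih =>
    intro b hlen hp
    cases b with
    | nil => simp at hlen
    | cons y b =>
      have h0 := hp 0 (by simp) (by simp)
      simp only [List.getElem_cons_zero] at h0
      have hrec := ih b (by simpa using hlen) (fun l hbl hal => by
        have := hp (l + 1) (by simpa using hbl) (by simpa using hal)
        simpa using this)
      rcases h0 with h0 | ⟨hx, hy⟩
      · subst h0
        simp only [List.countP_cons]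
        refine ⟨Nat.add_le_add_right hrec.1 _, fun he => ?_⟩
        have hbe : b.countP (fun x => x == 0) = a.countP (fun x => x == 0) :=
          Nat.add_right_cancel he
        rw [hrec.2 hbe]
      · subst hx
        subst hy
        have e1 : ((1 : Int) :: b).countP (fun x => x == 0) = b.countP (fun x => x == 0) := by
          simp
        have e2 : ((0 : Int) :: a).countP (fun x => x == 0) = a.countP (fun x => x == 0) + 1 := by
          simp
        rw [e1, e2]
        have := hrec.1
        exact ⟨by omega, fun he => by omega⟩

theorem pvMatLe : ∀ (A B : List (List Int)), B.length = A.length →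
    (∀ k (hbk : k < B.length) (hak : k < A.length), B[k].length = A[k].length ∧
      ∀ l (hbl : l < B[k].length) (hal : l < A[k].length),
        B[k][l] = A[k][l] ∨ (A[k][l] = 0 ∧ B[k][l] = 1)) →
    pvZeros B ≤ pvZeros A ∧ (pvZeros B = pvZeros A → B = A) := by
  intro A
  induction A with
  | nil =>
    intro B hlen _
    have hb : B = [] := List.eq_nil_of_length_eq_zero (by simpa using hlen)
    subst hb
    exact ⟨le_rfl, fun _ => rfl⟩
  | cons r A ih =>
    intro B hlen hp
    cases B with
    | nil => simp at hlen
    | cons s B =>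
      have h0 := hp 0 (by simp) (by simp)
      simp only [List.getElem_cons_zero] at h0
      have hrow := pvRowLe r s h0.1 h0.2
      have hrec := ih B (by simpa using hlen) (fun k hbk hak => by
        have := hp (k + 1) (by simpa using hbk) (by simpa using hak)
        simpa using this)
      rw [pvZeros_cons, pvZeros_cons]
      refine ⟨Nat.add_le_add hrow.1 hrec.1, fun he => ?_⟩
      have h1 : s.countP (fun x => x == 0) = r.countP (fun x => x == 0) := by
        have := hrow.1; have := hrec.1; omega
      have h2 : pvZeros B = pvZeros A := by omega
      rw [hrow.2 h1, hrec.2 h2]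

theorem pvZeros_dilate (rows columns : Int) (cur : List (List Int))
    (hws : pvWS rows columns cur) :
    pvZeros (pvDilate rows columns cur) ≤ pvZeros cur ∧
      (pvZeros (pvDilate rows columns cur) = pvZeros cur → pvDilate rows columns cur = cur) := by
  have hwsD := pvWS_dilate rows columns cur
  apply pvMatLe cur (pvDilate rows columns cur) (hwsD.1.trans hws.1.symm)
  intro k hbk hak
  have hkr : (k : Int) < rows := by
    have := hws.1 ▸ hak
    omega
  have hrl : (pvDilate rows columns cur)[k].length = cur[k].length := by
    rw [hwsD.2 _ (List.getElem_mem _), hws.2 _ (List.getElem_mem _)]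
  refine ⟨hrl, ?_⟩
  intro l hbl hal
  have hlc : (l : Int) < columns := by
    have hc := hws.2 _ (List.getElem_mem hak)
    rw [hc] at hal
    omega
  have hin : pvInw rows columns k l := ⟨Int.natCast_nonneg k, hkr, Int.natCast_nonneg l, hlc⟩
  have e1 : (pvDilate rows columns cur)[k][l] = pvGet (pvDilate rows columns cur) (k:Int) (l:Int) :=
    (pvGet_elem _ k l hbk hbl).symm
  have e2 : cur[k][l] = pvGet cur (k : Int) (l : Int) := (pvGet_elem cur k l hak hal).symm
  rw [e1, e2, pvGet_dilate rows columns cur _ _ hin]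
  by_cases hcond : pvGet cur (k : Int) (l : Int) = 0 ∧ pvNbrB rows columns cur (k:Int) (l:Int) = true
  · rw [if_pos hcond]
    exact Or.inr ⟨hcond.1, rfl⟩
  · rw [if_neg hcond]
    exact Or.inl rfl

theorem pvDirs_neg (d : Int × Int) (hd : d ∈ pvDirs) : (-d.1, -d.2) ∈ pvDirs := by
  simp only [pvDirs, List.mem_cons, List.not_mem_nil, or_false] at hd ⊢
  rcases hd with rfl | rfl | rfl | rfl <;> norm_num

theorem pvNbr_iff (rows columns : Int) (cur : List (List Int)) (i j : Int)
    (h : pvInw rows columns i j) :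
    pvNbrB rows columns cur i j = true
      ↔ ∃ d ∈ pvDirs, pvInw rows columns (i + d.1) (j + d.2) ∧
          pvGet cur (i + d.1) (j + d.2) = 1 := by
  obtain ⟨hi0, hir, hj0, hjc⟩ := h
  constructor
  · intro hb
    simp only [pvNbrB, Bool.or_eq_true, decide_eq_true_eq] at hb
    rcases hb with ((⟨h1, h2⟩ | ⟨h1, h2⟩) | ⟨h1, h2⟩) | ⟨h1, h2⟩
    · exact ⟨(1, 0), by simp [pvDirs], ⟨by omega, by omega, by omega, by omega⟩,
        by simpa using h2⟩
    · exact ⟨(-1, 0), by simp [pvDirs], ⟨by omega, by omega, by omega, by omega⟩,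
        by rw [show i + ((-1 : Int), (0 : Int)).1 = i - 1 by show i + (-1 : Int) = i - 1; ring]; simpa using h2⟩
    · exact ⟨(0, 1), by simp [pvDirs], ⟨by omega, by omega, by omega, by omega⟩,
        by simpa using h2⟩
    · exact ⟨(0, -1), by simp [pvDirs], ⟨by omega, by omega, by omega, by omega⟩,
        by rw [show j + ((0 : Int), (-1 : Int)).2 = j - 1 by show j + (-1 : Int) = j - 1; ring]; simpa using h2⟩
  · rintro ⟨d, hd, hin2, h1⟩
    simp only [pvDirs, List.mem_cons, List.not_mem_nil, or_false] at hd
    simp only [pvNbrB, Bool.or_eq_true, decide_eq_true_eq]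
    obtain ⟨ha, hb', hc', hd'⟩ := hin2
    rcases hd with rfl | rfl | rfl | rfl
    · exact Or.inl (Or.inl (Or.inl ⟨by simpa using hb', by simpa using h1⟩))
    · refine Or.inl (Or.inl (Or.inr ⟨by simpa using ha, ?_⟩))
      rw [show i - 1 = i + ((-1 : Int), (0 : Int)).1 by show i - 1 = i + (-1 : Int); ring]
      simpa using h1
    · exact Or.inl (Or.inr ⟨by simpa using hd', by simpa using h1⟩)
    · refine Or.inr ⟨by simpa using hc', ?_⟩
      rw [show j - 1 = j + ((0 : Int), (-1 : Int)).2 by show j - 1 = j + (-1 : Int); ring]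
      simpa using h1

theorem pvFlipIff (rows columns : Int) (q : List (Int × Int)) (g cur : List (List Int))
    (hag : pvAgree rows columns g cur) (hA : pvInvA rows columns q g)
    (hB : pvInvB rows columns q g) (i j : Int) :
    pvFlip rows columns q g i j
      ↔ pvInw rows columns i j ∧ pvGet cur i j = 0 ∧ pvNbrB rows columns cur i j = true := by
  constructor
  · rintro ⟨hin, h0, c, hcq, d, hd, hi, hj⟩
    refine ⟨hin, by rw [← hag i j hin]; exact h0, ?_⟩
    rw [pvNbr_iff rows columns cur i j hin]
    obtain ⟨hcin, hc1⟩ := hA c hcq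
    refine ⟨(-d.1, -d.2), pvDirs_neg d hd, ?_, ?_⟩
    · rw [show i + (-d.1, -d.2).1 = c.1 by simp; omega, show j + (-d.1, -d.2).2 = c.2 by simp; omega]
      exact hcin
    · rw [show i + (-d.1, -d.2).1 = c.1 by simp; omega, show j + (-d.1, -d.2).2 = c.2 by simp; omega]
      rw [← hag c.1 c.2 hcin]
      exact hc1
  · rintro ⟨hin, h0c, hb⟩
    have h0 : pvGet g i j = 0 := by rw [hag i j hin]; exact h0c
    rw [pvNbr_iff rows columns cur i j hin] at hb
    obtain ⟨d, hd, hin2, h1c⟩ := hb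
    have h1 : pvGet g (i + d.1) (j + d.2) = 1 := by rw [hag _ _ hin2]; exact h1c
    have hmem := hB (i + d.1) (j + d.2) hin2 h1
      ⟨(-d.1, -d.2), pvDirs_neg d hd, by
        rw [show i + d.1 + (-d.1, -d.2).1 = i by simp,
          show j + d.2 + (-d.1, -d.2).2 = j by simp]
        exact ⟨hin, h0⟩⟩
    exact ⟨hin, h0, (i + d.1, j + d.2), hmem, (-d.1, -d.2), pvDirs_neg d hd,
      by simp, by simp⟩

theorem pvDirFoldChar (rows columns ci cj : Int) :
    ∀ (ds : List (Int × Int)) (g : List (List Int)) (acc : List (Int × Int)),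
      pvPt (List.foldl (pvDirStepA rows columns ci cj) (g, acc) ds).1 g
        (pvFlipD rows columns ci cj ds g)
      ∧ ∃ nw, (List.foldl (pvDirStepA rows columns ci cj) (g, acc) ds).2 = acc ++ nw
          ∧ ∀ t : Int × Int, t ∈ nw ↔ pvFlipD rows columns ci cj ds g t.1 t.2 := by
  intro ds
  induction ds with
  | nil =>
    intro g acc
    constructor
    · intro i j hi hj
      refine ⟨fun hP => ?_, fun _ => rfl⟩
      obtain ⟨-, -, d, hd, -⟩ := hP
      simp at hd
    · refine ⟨[], by simp, fun t => ⟨fun ht => by simp at ht, fun hP => ?_⟩⟩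
      obtain ⟨-, -, d, hd, -⟩ := hP
      simp at hd
  | cons d ds ih =>
    intro g acc
    simp only [List.foldl_cons]
    by_cases hc : 0 ≤ ci + d.1 ∧ ci + d.1 < rows ∧ 0 ≤ cj + d.2 ∧ cj + d.2 < columns ∧
        pvGet g (ci + d.1) (cj + d.2) = 0
    · have hstep : pvDirStepA rows columns ci cj (g, acc) d
          = (pvSet1 g (ci + d.1) (cj + d.2), acc ++ [(ci + d.1, cj + d.2)]) := by
        unfold pvDirStepA
        dsimp only
        rw [if_pos hc]
      rw [hstep]
      obtain ⟨ihp, nw, hnw, hmem⟩ := ih (pvSet1 g (ci + d.1) (cj + d.2))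
        (acc ++ [(ci + d.1, cj + d.2)])
      have hget : ∀ i' j' : Int, 0 ≤ i' → 0 ≤ j' →
          pvGet (pvSet1 g (ci + d.1) (cj + d.2)) i' j'
            = if i' = ci + d.1 ∧ j' = cj + d.2 then 1 else pvGet g i' j' :=
        fun i' j' h1 h2 =>
          pvGet_set1 g _ _ i' j' hc.2.2.2.2 hc.1 hc.2.2.1 h1 h2
      have hiff : ∀ i j : Int, pvFlipD rows columns ci cj (d :: ds) g i j ↔
          ((i = ci + d.1 ∧ j = cj + d.2) ∨
            pvFlipD rows columns ci cj ds (pvSet1 g (ci + d.1) (cj + d.2)) i j) := by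
        intro i j
        constructor
        · rintro ⟨hin, h0, d', hd', hi, hj⟩
          by_cases he : i = ci + d.1 ∧ j = cj + d.2
          · exact Or.inl he
          · rcases List.mem_cons.mp hd' with rfl | hd2
            · exact absurd ⟨hi, hj⟩ he
            · refine Or.inr ⟨hin, ?_, d', hd2, hi, hj⟩
              rw [hget i j hin.1 hin.2.2.1, if_neg he]
              exact h0
        · rintro (⟨hi, hj⟩ | ⟨hin, h0, d', hd', hi, hj⟩)
          · subst hi; subst hj
            exact ⟨⟨hc.1, hc.2.1, hc.2.2.1, hc.2.2.2.1⟩, hc.2.2.2.2, d, by simp, rfl, rfl⟩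
          · have hne : ¬(i = ci + d.1 ∧ j = cj + d.2) := by
              intro he
              rw [hget i j hin.1 hin.2.2.1, if_pos he] at h0
              norm_num at h0
            refine ⟨hin, ?_, d', List.mem_cons_of_mem _ hd', hi, hj⟩
            rw [hget i j hin.1 hin.2.2.1, if_neg hne] at h0
            exact h0
      constructor
      · intro i j hi hj
        obtain ⟨p1, p2⟩ := ihp i j hi hj
        constructor
        · intro hP
          rcases (hiff i j).mp hP with he | hPd
          · by_cases hQ : pvFlipD rows columns ci cj ds (pvSet1 g (ci + d.1) (cj + d.2)) i j
            · exact p1 hQ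
            · rw [p2 hQ, hget i j hi hj, if_pos he]
          · exact p1 hPd
        · intro hP
          have hne : ¬(i = ci + d.1 ∧ j = cj + d.2) :=
            fun he => hP ((hiff i j).mpr (Or.inl he))
          have hQ : ¬ pvFlipD rows columns ci cj ds (pvSet1 g (ci + d.1) (cj + d.2)) i j :=
            fun hq => hP ((hiff i j).mpr (Or.inr hq))
          rw [p2 hQ, hget i j hi hj, if_neg hne]
      · refine ⟨(ci + d.1, cj + d.2) :: nw, by rw [hnw]; simp, ?_⟩
        intro t
        obtain ⟨t1, t2⟩ := t
        rw [List.mem_cons]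
        constructor
        · rintro (ht | ht)
          · rw [Prod.mk.injEq] at ht
            exact (hiff t1 t2).mpr (Or.inl ht)
          · exact (hiff t1 t2).mpr (Or.inr ((hmem (t1, t2)).mp ht))
        · intro hP
          rcases (hiff t1 t2).mp hP with he | hPd
          · left
            rw [Prod.mk.injEq]
            exact he
          · right
            exact (hmem (t1, t2)).mpr hPd
    · have hstep : pvDirStepA rows columns ci cj (g, acc) d = (g, acc) := by
        unfold pvDirStepA
        dsimp only
        rw [if_neg hc]
      rw [hstep]
      obtain ⟨ihp, nw, hnw, hmem⟩ := ih g acc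
      have hiff : ∀ i j : Int, pvFlipD rows columns ci cj (d :: ds) g i j ↔
          pvFlipD rows columns ci cj ds g i j := by
        intro i j
        constructor
        · rintro ⟨hin, h0, d', hd', hi, hj⟩
          rcases List.mem_cons.mp hd' with rfl | hd2
          · subst hi; subst hj
            exact absurd ⟨hin.1, hin.2.1, hin.2.2.1, hin.2.2.2, h0⟩ hc
          · exact ⟨hin, h0, d', hd2, hi, hj⟩
        · rintro ⟨hin, h0, d', hd', hi, hj⟩
          exact ⟨hin, h0, d', List.mem_cons_of_mem _ hd', hi, hj⟩
      constructor
      · intro i j hi hj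
        obtain ⟨p1, p2⟩ := ihp i j hi hj
        exact ⟨fun hP => p1 ((hiff i j).mp hP),
          fun hP => p2 (fun hq => hP ((hiff i j).mpr hq))⟩
      · exact ⟨nw, hnw, fun t => (hmem t).trans ((hiff t.1 t.2).symm)⟩

theorem pvLevelChar (rows columns : Int) :
    ∀ (q : List (Int × Int)) (g : List (List Int)) (acc : List (Int × Int)),
      pvPt (List.foldl (pvStepCellA rows columns) (g, acc) q).1 g
        (pvFlip rows columns q g)
      ∧ ∃ nw, (List.foldl (pvStepCellA rows columns) (g, acc) q).2 = acc ++ nw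
          ∧ ∀ t : Int × Int, t ∈ nw ↔ pvFlip rows columns q g t.1 t.2 := by
  intro q
  induction q with
  | nil =>
    intro g acc
    constructor
    · intro i j hi hj
      refine ⟨fun hP => ?_, fun _ => rfl⟩
      obtain ⟨-, -, c, hc, -⟩ := hP
      simp at hc
    · refine ⟨[], by simp, fun t => ⟨fun ht => by simp at ht, fun hP => ?_⟩⟩
      obtain ⟨-, -, c, hc, -⟩ := hP
      simp at hc
  | cons c q ih =>
    intro g acc
    simp only [List.foldl_cons]
    obtain ⟨ptc, nw1, hnw1, hmem1⟩ := pvDirFoldChar rows columns c.1 c.2 pvDirs g acc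
    rw [show pvStepCellA rows columns (g, acc) c
        = ((List.foldl (pvDirStepA rows columns c.1 c.2) (g, acc) pvDirs).1,
           (List.foldl (pvDirStepA rows columns c.1 c.2) (g, acc) pvDirs).2) from rfl]
    rw [hnw1]
    obtain ⟨ihp, nw2, hnw2, hmem2⟩ :=
      ih (List.foldl (pvDirStepA rows columns c.1 c.2) (g, acc) pvDirs).1 (acc ++ nw1)
    have hiff : ∀ i j : Int, pvFlip rows columns (c :: q) g i j ↔
        (pvFlipD rows columns c.1 c.2 pvDirs g i j ∨
          pvFlip rows columns q
            (List.foldl (pvDirStepA rows columns c.1 c.2) (g, acc) pvDirs).1 i j) := by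
      intro i j
      constructor
      · rintro ⟨hin, h0, c', hc', d, hd, hi, hj⟩
        by_cases hPd : pvFlipD rows columns c.1 c.2 pvDirs g i j
        · exact Or.inl hPd
        · rcases List.mem_cons.mp hc' with rfl | hcq
          · exact absurd ⟨hin, h0, d, hd, hi, hj⟩ hPd
          · refine Or.inr ⟨hin, ?_, c', hcq, d, hd, hi, hj⟩
            rw [(ptc i j hin.1 hin.2.2.1).2 hPd]
            exact h0
      · rintro (⟨hin, h0, d, hd, hi, hj⟩ | ⟨hin, h0, c', hc', d, hd, hi, hj⟩)
        · exact ⟨hin, h0, c, by simp, d, hd, hi, hj⟩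
        · have hPd : ¬ pvFlipD rows columns c.1 c.2 pvDirs g i j := by
            intro hh
            rw [(ptc i j hin.1 hin.2.2.1).1 hh] at h0
            norm_num at h0
          refine ⟨hin, ?_, c', List.mem_cons_of_mem _ hc', d, hd, hi, hj⟩
          rw [(ptc i j hin.1 hin.2.2.1).2 hPd] at h0
          exact h0
    constructor
    · intro i j hi hj
      obtain ⟨q1, q2⟩ := ihp i j hi hj
      obtain ⟨r1, r2⟩ := ptc i j hi hj
      constructor
      · intro hP
        rcases (hiff i j).mp hP with hPd | hPq
        · by_cases hQ : pvFlip rows columns q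
              (List.foldl (pvDirStepA rows columns c.1 c.2) (g, acc) pvDirs).1 i j
          · exact q1 hQ
          · rw [q2 hQ]
            exact r1 hPd
        · exact q1 hPq
      · intro hP
        have h1 : ¬ pvFlipD rows columns c.1 c.2 pvDirs g i j :=
          fun hh => hP ((hiff i j).mpr (Or.inl hh))
        have h2 : ¬ pvFlip rows columns q
            (List.foldl (pvDirStepA rows columns c.1 c.2) (g, acc) pvDirs).1 i j :=
          fun hh => hP ((hiff i j).mpr (Or.inr hh))
        rw [q2 h2, r2 h1]
    · refine ⟨nw1 ++ nw2, by rw [hnw2, List.append_assoc], ?_⟩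
      intro t
      rw [List.mem_append]
      constructor
      · rintro (ht | ht)
        · exact (hiff t.1 t.2).mpr (Or.inl ((hmem1 t).mp ht))
        · exact (hiff t.1 t.2).mpr (Or.inr ((hmem2 t).mp ht))
      · intro hP
        rcases (hiff t.1 t.2).mp hP with h | h
        · exact Or.inl ((hmem1 t).mpr h)
        · exact Or.inr ((hmem2 t).mpr h)

theorem pvMainLoop (rows columns : Int) :
    ∀ (fa : Nat) (fb : Nat) (g : List (List Int)) (q : List (Int × Int))
      (cur : List (List Int)) (h : Int),
      pvZeros g < fa → pvZeros cur < fb → pvWS rows columns cur → pvAgree rows columns g cur →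
      pvInvA rows columns q g → pvInvB rows columns q g →
      pvLoopA rows columns fa g q h = pvLoopDil rows columns fb cur h := by
  intro fa
  induction fa with
  | zero =>
    intro fb g q cur h hzg
    omega
  | succ fa ih =>
    intro fb g q cur h hzg hz hws hag hA hB
    cases fb with
    | zero => omega
    | succ fb =>
    rw [pvLoopA_eq]
    obtain ⟨pt, nw, hnw, hmem⟩ := pvLevelChar rows columns q g []
    have hst2 : (pvLevelA rows columns g q).2 = nw := by simpa [pvLevelA] using hnw
    have hpt : pvPt (pvLevelA rows columns g q).1 g (pvFlip rows columns q g) := pt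
    have hws' := pvWS_dilate rows columns cur
    have hflip := fun i j => pvFlipIff rows columns q g cur hag hA hB i j
    have hgetnxt : ∀ i j : Int, pvInw rows columns i j →
        pvGet (pvDilate rows columns cur) i j
          = if pvGet cur i j = 0 ∧ pvNbrB rows columns cur i j = true then 1
            else pvGet cur i j :=
      fun i j hin => pvGet_dilate rows columns cur i j hin
    have hbr : (pvLevelA rows columns g q).2.isEmpty = true ↔ pvDilate rows columns cur = cur := by
      rw [hst2, List.isEmpty_iff]
      constructor
      · intro hnil
        apply pvMatEq rows columns _ _ hws' hws
        intro i j hin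
        rw [hgetnxt i j hin]
        rw [if_neg]
        intro hcond
        have hf : pvFlip rows columns q g i j := (hflip i j).mpr ⟨hin, hcond.1, hcond.2⟩
        have hm := (hmem (i, j)).mpr hf
        rw [hnil] at hm
        simp at hm
      · intro hfix
        by_contra hne
        obtain ⟨t, ht⟩ := List.exists_mem_of_ne_nil nw hne
        have hf := (hmem t).mp ht
        have hdc := (hflip t.1 t.2).mp hf
        have h1 : pvGet (pvDilate rows columns cur) t.1 t.2 = 1 := by
          rw [hgetnxt t.1 t.2 hdc.1, if_pos ⟨hdc.2.1, hdc.2.2⟩]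
        rw [hfix, hdc.2.1] at h1
        norm_num at h1
    have hzl := pvZeros_levelA rows columns q (g, [])
    rw [hnw] at hzl
    show _ = pvLoopDil rows columns (fb + 1) cur h
    by_cases hfix : pvDilate rows columns cur = cur
    · rw [if_pos (hbr.mpr hfix)]
      show h = (if pvDilate rows columns cur = cur then h
        else pvLoopDil rows columns fb (pvDilate rows columns cur) (h + 1))
      rw [if_pos hfix]
    · rw [if_neg (fun hh => hfix (hbr.mp hh))]
      show _ = (if pvDilate rows columns cur = cur then h
        else pvLoopDil rows columns fb (pvDilate rows columns cur) (h + 1))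
      rw [if_neg hfix]
      have hzd := pvZeros_dilate rows columns cur hws
      have hzlt : pvZeros (pvDilate rows columns cur) < fb := by
        have hne2 : pvZeros (pvDilate rows columns cur) ≠ pvZeros cur :=
          fun he => hfix (hzd.2 he)
        have := hzd.1
        omega
      have hnwne : nw ≠ [] := by
        intro hh
        exact hfix (hbr.mp (by rw [hst2, hh]; rfl))
      have hzga : pvZeros (pvLevelA rows columns g q).1 < fa := by
        have hlp : 0 < nw.length := List.length_pos_of_ne_nil hnwne
        have : pvZeros (pvLevelA rows columns g q).1
            = pvZeros (List.foldl (pvStepCellA rows columns) (g, []) q).1 := rfl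
        simp only [List.nil_append, List.length_nil] at hzl
        omega
      rw [hst2]
      apply ih fb (pvLevelA rows columns g q).1 nw (pvDilate rows columns cur) (h + 1)
        hzga hzlt hws'
      · intro i j hin
        obtain ⟨p1, p2⟩ := hpt i j hin.1 hin.2.2.1
        rw [hgetnxt i j hin]
        by_cases hP : pvFlip rows columns q g i j
        · rw [p1 hP, if_pos ⟨((hflip i j).mp hP).2.1, ((hflip i j).mp hP).2.2⟩]
        · rw [p2 hP, if_neg (fun hcond => hP ((hflip i j).mpr ⟨hin, hcond.1, hcond.2⟩)),
            hag i j hin]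
      · intro c hcmem
        have hf := (hmem c).mp hcmem
        exact ⟨hf.1, (hpt c.1 c.2 hf.1.1 hf.1.2.2.1).1 hf⟩
      · intro i j hin h1 hex
        by_cases hP : pvFlip rows columns q g i j
        · exact (hmem (i, j)).mpr hP
        · have hg1 : pvGet g i j = 1 := by
            rw [← (hpt i j hin.1 hin.2.2.1).2 hP]
            exact h1
          obtain ⟨d, hd, hin2, h0'⟩ := hex
          have hnf : ¬ pvFlip rows columns q g (i + d.1) (j + d.2) := by
            intro hPf
            rw [(hpt (i + d.1) (j + d.2) hin2.1 hin2.2.2.1).1 hPf] at h0'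
            norm_num at h0'
          have h0g : pvGet g (i + d.1) (j + d.2) = 0 := by
            rw [← (hpt (i + d.1) (j + d.2) hin2.1 hin2.2.2.1).2 hnf]
            exact h0'
          have hq := hB i j hin hg1 ⟨d, hd, hin2, h0g⟩
          exact absurd ⟨hin2, h0g, (i, j), hq, d, hd, rfl, rfl⟩ hnf

theorem pvMem_seedsA (rows columns : Int) (g : List (List Int)) (c : Int × Int) :
    c ∈ pvSeedsA rows columns g ↔ pvInw rows columns c.1 c.2 ∧ pvGet g c.1 c.2 = 1 := by
  obtain ⟨c1, c2⟩ := c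
  rw [pvSeedsA_flat]
  simp only [List.mem_flatMap, List.mem_map, List.mem_filter, PySem.List.mem_pyRange_one,
    decide_eq_true_eq]
  constructor
  · rintro ⟨i, ⟨hi0, hir⟩, j, ⟨⟨hj0, hjc⟩, hg⟩, heq⟩
    rw [Prod.mk.injEq] at heq
    obtain ⟨rfl, rfl⟩ := heq
    exact ⟨⟨hi0, hir, hj0, hjc⟩, hg⟩
  · rintro ⟨⟨hi0, hir, hj0, hjc⟩, hg⟩
    exact ⟨c1, ⟨hi0, hir⟩, c2, ⟨⟨hj0, hjc⟩, hg⟩, rfl⟩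

-- ===== VERDICT (by name: the statement is the Claim_ definition above) =====
theorem minimumHours_spec : Claim_equal_minimumHours := by
  unfold Claim_equal_minimumHours
  intro rows columns grid _ _
  unfold Spec_minimumHours minimumHours minimumHours_alt
  by_cases hneg : rows ≤ 0 ∨ columns ≤ 0
  · rw [if_pos hneg]
    by_cases h0 : rows = 0 ∨ columns = 0
    · rw [if_pos h0]
    · rw [if_neg h0]
      obtain ⟨hr, hc⟩ := not_or.mp h0
      have hseeds := pvSeedsA_nil rows columns grid hneg
      show (if ((pvSeedsA rows columns grid).length : Int) = rows * columns then 0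
            else pvLoopA rows columns (pvZeros grid + 1) grid (pvSeedsA rows columns grid) 0) = 0
      rw [hseeds]
      have hall : ¬ ((([] : List (Int × Int)).length : Int) = rows * columns) := by
        simpa using (mul_ne_zero hr hc).symm
      rw [if_neg hall, pvLoopA_nil]
  · rw [if_neg hneg]
    obtain ⟨hr0, hc0⟩ := not_or.mp hneg
    have h0 : ¬(rows = 0 ∨ columns = 0) := by omega
    rw [if_neg h0]
    obtain ⟨hr, hc⟩ := not_or.mp h0
    show (if ((pvSeedsA rows columns grid).length : Int) = rows * columns then 0
          else pvLoopA rows columns (pvZeros grid + 1) grid (pvSeedsA rows columns grid) 0)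
        = pvLoopDil rows columns (pvZeros (pvCrop rows columns grid) + 1)
            (pvCrop rows columns grid) 0
    have hwsc := pvWS_crop rows columns grid
    have hagc : pvAgree rows columns grid (pvCrop rows columns grid) := by
      intro i j hin
      exact (pvGet_crop rows columns grid i j hin).symm
    by_cases hall : ((pvSeedsA rows columns grid).length : Int) = rows * columns
    · rw [if_pos hall]
      have hones := pvAllOnes rows columns grid hr hc hall
      have hfix : pvDilate rows columns (pvCrop rows columns grid) = pvCrop rows columns grid := by
        apply pvMatEq rows columns _ _ (pvWS_dilate _ _ _) hwsc
        intro i j hin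
        rw [pvGet_dilate rows columns _ i j hin]
        rw [if_neg]
        intro hcond
        have h1 : pvGet (pvCrop rows columns grid) i j = 1 := by
          rw [pvGet_crop rows columns grid i j hin]
          exact hones i j hin.1 hin.2.1 hin.2.2.1 hin.2.2.2
        rw [h1] at hcond
        exact absurd hcond.1 (by norm_num)
      show 0 = pvLoopDil rows columns (pvZeros (pvCrop rows columns grid) + 1)
          (pvCrop rows columns grid) 0
      rw [pvLoopDil]
      simp [hfix]
    · rw [if_neg hall]
      apply pvMainLoop rows columns _ _ _ _ _ _ (by omega) (by omega) hwsc hagc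
      · intro c hcmem
        exact (pvMem_seedsA rows columns grid c).mp hcmem
      · intro i j hin h1 _
        exact (pvMem_seedsA rows columns grid (i, j)).mpr ⟨hin, h1⟩
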